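-- pv_equiv track=rewrite | github.com/scribby182/GT-CS-7641-Assignment-2 | utilities.py | structure2str
-- ===== SOURCE A (Python) =====
-- def structure2str(hidden_layer_sizes, string="", sep='-'):
--     """
--     Convert a tuple of hidden layer sizes into a string of sizes separated by sep
--     """
--     if len(hidden_layer_sizes) == 0:
--         raise ValueError("Invalid hidden_layer_sizes, must be of at least length of 1")
--     else:
--         if len(string) == 0:
--             string = str(hidden_layer_sizes[0])
--         else:
--             string = string + sep + str(hidden_layer_sizes[0])
--         if len(hidden_layer_sizes) > 1:
--             return structure2str(hidden_layer_sizes[1:], string=string, sep=sep)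
--         else:
--             return string
-- ===== SOURCE B (Python) =====
-- def structure2str(hidden_layer_sizes, string="", sep='-'):
--     """
--     Convert a tuple of hidden layer sizes into a string of sizes separated by sep
--     """
--     if len(hidden_layer_sizes) == 0:
--         raise ValueError("Invalid hidden_layer_sizes, must be of at least length of 1")
--     joined = sep.join(str(x) for x in hidden_layer_sizes)
--     return joined if len(string) == 0 else string + sep + joined
-- ===== Notes on version B (the rewrite author's own statement) =====
-- stated objective: faster
-- what changed: Replaced the O(n^2) recursion with repeated list slicing by a single linear pass: map str over the sizes and sep.join them, prepending the initial string with sep when it is non-empty.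
import Mathlib
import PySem

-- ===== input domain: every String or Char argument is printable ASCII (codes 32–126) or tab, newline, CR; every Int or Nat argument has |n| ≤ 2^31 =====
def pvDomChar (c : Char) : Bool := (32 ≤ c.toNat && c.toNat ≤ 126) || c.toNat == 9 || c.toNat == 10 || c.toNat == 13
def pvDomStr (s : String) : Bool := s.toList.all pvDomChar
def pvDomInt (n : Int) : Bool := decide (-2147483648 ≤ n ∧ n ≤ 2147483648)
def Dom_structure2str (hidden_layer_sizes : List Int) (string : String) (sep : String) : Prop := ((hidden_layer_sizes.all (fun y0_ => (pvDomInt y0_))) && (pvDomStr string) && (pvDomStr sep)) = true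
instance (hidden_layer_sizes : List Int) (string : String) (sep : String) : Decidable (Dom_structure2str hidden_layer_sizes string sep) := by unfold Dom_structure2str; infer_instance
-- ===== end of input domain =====

-- B replaces A's O(n^2) slicing recursion by one linear pass: join the stringified sizes with sep
-- and prepend the initial string (objective: simpler).


-- ===== PORT A =====
def structure2str (hidden_layer_sizes : List Int) (string : String) (sep : String) : String :=
  match hidden_layer_sizes with
  | [] => ""  -- Python raises ValueError here; excluded by Pre_structure2str
  | x :: rest =>
    let string' := if PySem.Str.len string = 0 then PySem.Int.toStr x
                   else string ++ sep ++ PySem.Int.toStr x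
    -- Python: 'if len(hidden_layer_sizes) > 1: return structure2str(hidden_layer_sizes[1:], …)';
    -- here hidden_layer_sizes[1:] is rest and len > 1 means rest is non-empty
    if rest.length > 0 then structure2str rest string' sep else string'

-- ===== PORT B =====
def structure2str_alt (hidden_layer_sizes : List Int) (string : String) (sep : String) : String :=
  -- Source B raises ValueError on [] (excluded by Pre_structure2str)
  let joined := PySem.Str.join sep (hidden_layer_sizes.map PySem.Int.toStr)
  if PySem.Str.len string = 0 then joined else string ++ sep ++ joined

-- ===== PRECONDITION & SPEC =====
-- Pre_ excludes only the empty list, on which the Python A raises ValueError.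
def Pre_structure2str (hidden_layer_sizes : List Int) (string : String) (sep : String) : Prop :=
  hidden_layer_sizes ≠ []
instance (hidden_layer_sizes : List Int) (string : String) (sep : String) : Decidable (Pre_structure2str hidden_layer_sizes string sep) := by unfold Pre_structure2str; infer_instance
def pvWitness_structure2str : List Int × String × String := ([3, 5], "", "-")

def Spec_structure2str (hidden_layer_sizes : List Int) (string : String) (sep : String) (out : String) : Prop := out = structure2str_alt hidden_layer_sizes string sep
instance (hidden_layer_sizes : List Int) (string : String) (sep : String) (out : String) : Decidable (Spec_structure2str hidden_layer_sizes string sep out) := by unfold Spec_structure2str; infer_instance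

-- ===== CLAIM (what is proved, stated in full; the proofs are below) =====
def Claim_equal_structure2str : Prop := ∀ (hidden_layer_sizes : List Int) (string : String) (sep : String), Dom_structure2str hidden_layer_sizes string sep → Pre_structure2str hidden_layer_sizes string sep → Spec_structure2str hidden_layer_sizes string sep (structure2str hidden_layer_sizes string sep)

-- ===== LEMMAS AND PROOFS =====
theorem pv_tdc_len (b : Nat) : ∀ (f n : Nat) (l : List Char), l.length < (Nat.toDigitsCore b (f+1) n l).length := by
  intro f
  induction f with
  | zero => intro n l; rw [Nat.toDigitsCore]; split <;> simp [Nat.toDigitsCore]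
  | succ f ih =>
    intro n l
    rw [Nat.toDigitsCore]
    split
    · simp
    · exact Nat.lt_trans (by simp) (ih _ _)

theorem pv_toDigits_ne_nil (b n : Nat) : Nat.toDigits b n ≠ [] := by
  have := pv_tdc_len b n n []
  intro h; rw [Nat.toDigits] at h; rw [h] at this; simp at this

theorem pv_toChars_ne_nil (n : Int) : PySem.Int.toChars n ≠ [] := by
  unfold PySem.Int.toChars
  split
  · simp
  · exact pv_toDigits_ne_nil _ _

theorem structure2str_toList (hls : List Int) : ∀ (x : Int) (s sep : String),
    (structure2str (x :: hls) s sep).toList =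
      (if s.toList.length = 0 then ([] : List Char) else s.toList ++ sep.toList) ++
        PySem.Chars.join sep.toList ((x :: hls).map PySem.Int.toChars) := by
  induction hls with
  | nil =>
    intro x s sep
    simp only [structure2str, List.length_nil, gt_iff_lt, Nat.lt_irrefl, if_false,
      List.map_cons, List.map_nil, PySem.Chars.join_singleton]
    split_ifs with h <;> simp_all [PySem.Int.toStr]
  | cons y rest ih =>
    intro x s sep
    have hstep : structure2str (x :: y :: rest) s sep =
        structure2str (y :: rest)
          (if PySem.Str.len s = 0 then PySem.Int.toStr x else s ++ sep ++ PySem.Int.toStr x) sep := by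
      simp [structure2str]
    rw [hstep, ih]
    simp only [List.map_cons]
    rw [PySem.Chars.join_cons_cons]
    split_ifs with h h1 h2 <;>
      simp_all [PySem.Int.toStr, pv_toChars_ne_nil, List.append_assoc]

theorem structure2str_alt_toList (hls : List Int) (s sep : String) :
    (structure2str_alt hls s sep).toList =
      (if s.toList.length = 0 then ([] : List Char) else s.toList ++ sep.toList) ++
        PySem.Chars.join sep.toList (hls.map PySem.Int.toChars) := by
  simp only [structure2str_alt, PySem.Str.join, PySem.Str.len_eq, Int.natCast_eq_zero]
  split_ifs with h <;>
    simp [List.map_map, Function.comp_def, PySem.Int.toStr, List.append_assoc]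

-- ===== VERDICT (by name: the statement is the Claim_ definition above) =====
theorem structure2str_spec : Claim_equal_structure2str := by
  intro hls s sep _ hpre
  unfold Spec_structure2str
  apply String.toList_inj.mp
  match hls, hpre with
  | x :: rest, _ =>
    rw [structure2str_toList, structure2str_alt_toList]
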